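-- pv_equiv track=rewrite | github.com/0rphon/phrasefinder | phrasefinder.py | find_phrases
-- ===== SOURCE A (Python) =====
-- def find_phrases(phrases, files):
--     html_tags = ["<div>", "</div>", "<br>", "<b>", "</b>", "<u>", "</u>", "<li>", "</li>", "<i>", "</i>", "<ol>", "</ol>"]
--     found = {}
--     for phrase in phrases:
--         found[phrase] = []
--         for (name,text) in files:
--             parted = text.partition(phrase)
--             while len(parted[1]) == len(phrase):
--                 context = "{}{}{}".format(
--                         (" ".join(parted[0].split(" ")[-10:])),
--                         parted[1],
--                         (" ".join(parted[2].split(" ")[:10]))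
--                     ).replace("\n", " ")
--                 for x in html_tags: context = context.replace(x, "")
--                 found[phrase].append((name.split("/")[-1], context))
--                 parted = parted[2].partition(phrase)
--     return found
-- ===== SOURCE B (Python) =====
-- def find_phrases(phrases, files):
--     html_tags = ["<div>", "</div>", "<br>", "<b>", "</b>", "<u>", "</u>", "<li>", "</li>", "<i>", "</i>", "<ol>", "</ol>"]
--
--     def feed(s, k, out):
--         # append chars of s to out, stopping just before the k-th space; returns remaining k (0 = stopped)
--         for ch in s:
--             if ch == " ":
--                 k -= 1
--                 if k == 0:
--                     return 0
--             out.append(ch)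
--         return k
--
--     def clean(c):
--         c = c.replace("\n", " ")
--         for x in html_tags:
--             c = c.replace(x, "")
--         return c
--
--     found = {}
--     for p in phrases:
--         hits = []
--         for name, text in files:
--             base = name.split("/")[-1]
--             parts = text.split(p)
--             for idx in range(len(parts) - 1):
--                 out = []
--                 feed(parts[idx][::-1], 10, out)
--                 before = "".join(out)[::-1]
--                 out = []
--                 k = feed(parts[idx + 1], 10, out)
--                 j = idx + 2
--                 while k and j < len(parts):
--                     k = feed(p, k, out)
--                     if k:
--                         k = feed(parts[j], k, out)
--                     j += 1
--                 hits.append((base, clean(before + p + "".join(out))))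
--         found[p] = hits
--     return found
-- ===== Notes on version B (the rewrite author's own statement) =====
-- stated objective: alternative
-- what changed: B splits each text once with text.split(phrase) and builds every context by an early-stopping character feed (stop just before the 10th space, continuing lazily across the following parts), instead of A's repeated str.partition loop that copies the whole remaining tail and word-splits the entire remaining text at every match; B trades A's C-level split/join of the whole tail for bounded Python-level scans, so it wins on wordy texts and loses on space-free dense-match texts.
-- outside the precondition, e.g. on find_phrases([''], []): A returns {'': []}, B returns {'': []}
import Mathlib
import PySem

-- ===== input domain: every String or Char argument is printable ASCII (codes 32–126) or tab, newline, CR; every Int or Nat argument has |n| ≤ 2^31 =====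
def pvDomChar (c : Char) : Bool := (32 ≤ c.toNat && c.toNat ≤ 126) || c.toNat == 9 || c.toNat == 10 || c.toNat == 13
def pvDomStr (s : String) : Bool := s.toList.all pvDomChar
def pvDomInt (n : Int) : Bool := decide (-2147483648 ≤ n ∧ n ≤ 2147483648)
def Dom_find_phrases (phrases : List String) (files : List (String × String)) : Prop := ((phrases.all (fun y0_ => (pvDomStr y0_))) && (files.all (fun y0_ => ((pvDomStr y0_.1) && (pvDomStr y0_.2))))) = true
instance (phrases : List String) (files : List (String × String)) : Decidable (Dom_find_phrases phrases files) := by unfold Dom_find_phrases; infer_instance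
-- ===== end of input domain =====

-- B replaces A's repeated-partition scan by ONE text.split(phrase) per (phrase, file) and builds each
-- context by an early-stopping character feed across the parts (stop at the 10th space) instead of A's
-- full tail copy and full word-split of the remaining text at every match: a different algorithm of
-- similar overall cost, same results.


-- ===== PORT A =====
def pvTags : List (List Char) :=
  ["<div>".toList, "</div>".toList, "<br>".toList, "<b>".toList, "</b>".toList, "<u>".toList,
   "</u>".toList, "<li>".toList, "</li>".toList, "<i>".toList, "</i>".toList, "<ol>".toList, "</ol>".toList]

-- str.partition ported by hand via Chars.find (PySem has no partition); exact for the
-- nonempty separators Pre_ admits (Python raises ValueError on an empty separator).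
def pvPartition (t p : List Char) : List Char × List Char × List Char :=
  let i := PySem.Chars.find t p
  if i = -1 then (t, [], []) else (t.take i.toNat, p, t.drop (i.toNat + p.length))

-- A's context expression: " ".join(parted[0].split(" ")[-10:]) + parted[1] + " ".join(parted[2].split(" ")[:10]),
-- then .replace("\n", " ") and the html-tag replace loop.
def pvCtxA (parted : List Char × List Char × List Char) : List Char :=
  let c := PySem.Chars.join [' '] (PySem.List.slice (PySem.Chars.splitOn parted.1 [' ']) (some (-10)) none)
            ++ parted.2.1
            ++ PySem.Chars.join [' '] (PySem.List.slice (PySem.Chars.splitOn parted.2.2 [' ']) none (some 10))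
  pvTags.foldl (fun c x => PySem.Chars.replace c x []) (PySem.Chars.replace c ['\n'] [' '])

-- A's while loop; fuel text.length+1 suffices (each matched iteration drops ≥ |phrase| ≥ 1 chars).
def pvLoopA (phrase name : List Char) (fuel : Nat) (parted : List Char × List Char × List Char)
    (acc : List (String × String)) : List (String × String) :=
  match fuel with
  | 0 => acc
  | fuel + 1 =>
    if parted.2.1.length = phrase.length then
      pvLoopA phrase name fuel (pvPartition parted.2.2 phrase)
        (acc ++ [(String.ofList (PySem.List.pyGetD (PySem.Chars.splitOn name ['/']) (-1) []), String.ofList (pvCtxA parted))])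
    else acc

def find_phrases (phrases : List String) (files : List (String × String)) : List (String × List (String × String)) :=
  (phrases.foldl (fun found phrase =>
      found.insert phrase (files.foldl
        (fun lst nt => pvLoopA phrase.toList nt.1.toList (nt.2.toList.length + 1)
                          (pvPartition nt.2.toList phrase.toList) lst) []))
    (PySem.Dict.empty : PySem.Dict String (List (String × String)))).items

-- ===== PORT B =====
-- Source B's feed(s, k, out): append chars of s until just before the k-th space; returns (appended, k'),
-- k' = 0 meaning stopped (the out accumulator of the Python loop becomes the first component).
def pvFeed (s : List Char) (k : Nat) : List Char × Nat :=
  match s with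
  | [] => ([], k)
  | c :: t =>
    if c = ' ' then
      (if k - 1 = 0 then ([], 0) else ((c :: (pvFeed t (k - 1)).1), (pvFeed t (k - 1)).2))
    else ((c :: (pvFeed t k).1), (pvFeed t k).2)

-- Source B's clean(c): replace "\n" by " ", then strip the html tags.
def pvClean (c : List Char) : List Char :=
  pvTags.foldl (fun c x => PySem.Chars.replace c x []) (PySem.Chars.replace c ['\n'] [' '])

-- Source B's inner while loop: alternately feed the phrase and the next part while k > 0 and parts remain.
def pvWhileB (p : List Char) : List (List Char) → Nat → List Char
  | [], _ => []
  | z :: r, k =>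
    if k = 0 then []
    else
      if (pvFeed p k).2 = 0 then (pvFeed p k).1
      else (pvFeed p k).1 ++ (pvFeed z (pvFeed p k).2).1 ++ pvWhileB p r (pvFeed z (pvFeed p k).2).2

-- Source B's for idx in range(len(parts)-1): parts[idx] is the before-segment (fed reversed: [::-1] is
-- List.reverse, exact), parts[idx+1:] feeds the after-context.
def pvLoopB (base p : List Char) : List (List Char) → List (String × String)
  | [] => []
  | [_] => []
  | x :: y :: rest =>
    (String.ofList base,
     String.ofList (pvClean ((pvFeed x.reverse 10).1.reverse ++ p
        ++ ((pvFeed y 10).1 ++ pvWhileB p rest (pvFeed y 10).2))))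
      :: pvLoopB base p (y :: rest)

def find_phrases_alt (phrases : List String) (files : List (String × String)) : List (String × List (String × String)) :=
  (phrases.foldl (fun found p =>
      found.insert p (files.foldl (fun hits nt =>
        hits ++ pvLoopB (PySem.List.pyGetD (PySem.Chars.splitOn nt.1.toList ['/']) (-1) []) p.toList
                  (PySem.Chars.splitOn nt.2.toList p.toList)) []))
    (PySem.Dict.empty : PySem.Dict String (List (String × String)))).items

-- ===== PRECONDITION & SPEC =====
-- Pre_ excludes only inputs with an empty phrase: A raises ValueError ("empty separator") whenever
-- files is nonempty, and B raises there too (str.split("")); with files = [] both return the same dict.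
def Pre_find_phrases (phrases : List String) (files : List (String × String)) : Prop :=
  ∀ p ∈ phrases, p ≠ ""
instance (phrases : List String) (files : List (String × String)) : Decidable (Pre_find_phrases phrases files) := by
  unfold Pre_find_phrases; infer_instance

def pvWitness_find_phrases : List String × (List (String × String)) :=
  (["ab"], [("d/f.txt", "x ab y ab")])

def Spec_find_phrases (phrases : List String) (files : List (String × String)) (out : List (String × List (String × String))) : Prop := out = find_phrases_alt phrases files
instance (phrases : List String) (files : List (String × String)) (out : List (String × List (String × String))) : Decidable (Spec_find_phrases phrases files out) := by unfold Spec_find_phrases; infer_instance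

-- ===== CLAIM (what is proved, stated in full; the proofs are below) =====
def Claim_equal_find_phrases : Prop := ∀ (phrases : List String) (files : List (String × String)), Dom_find_phrases phrases files → Pre_find_phrases phrases files → Spec_find_phrases phrases files (find_phrases phrases files)

-- ===== LEMMAS AND PROOFS =====

-- proof vocabulary: the one-string scan pvFeed computes, and its stop counter
def pvScan (s : List Char) (k : Nat) : List Char :=
  match s with
  | [] => []
  | c :: t => if c = ' ' then (if k - 1 = 0 then [] else c :: pvScan t (k - 1)) else c :: pvScan t k

theorem find_nil_of_ne (p : List Char) (hp : p ≠ []) : PySem.Chars.find [] p = -1 := by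
  rw [PySem.Chars.find_eq_neg_one_iff]
  rw [List.infix_nil]
  exact hp

theorem prefix_drop_eq (p t : List Char) (n : Nat) (h : p <+: t.drop n) :
    t.drop n = p ++ t.drop (n + p.length) := by
  obtain ⟨u, hu⟩ := h
  rw [← hu]
  congr 1
  have h2 : t.drop (n + p.length) = (t.drop n).drop p.length := by rw [List.drop_drop, Nat.add_comm]
  rw [h2, ← hu, List.drop_left]

theorem drop_lt_of_find (p t : List Char) (hp : p ≠ []) (h : PySem.Chars.find t p ≠ -1) :
    (t.drop ((PySem.Chars.find t p).toNat + p.length)).length < t.length := by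
  have h0 : 0 ≤ PySem.Chars.find t p := by
    have := PySem.Chars.neg_one_le_find t p
    omega
  obtain ⟨hpre, -⟩ := PySem.Chars.find_spec h0
  have hplen : 0 < p.length := List.length_pos_iff.mpr hp
  have := hpre.length_le
  simp only [List.length_drop] at this ⊢
  omega

theorem find_eq_zero (p t : List Char) (h : p <+: t) : PySem.Chars.find t p = 0 := by
  have h0 : 0 ≤ PySem.Chars.find t p := by
    rw [PySem.Chars.find_nonneg_iff]
    exact h.isInfix
  obtain ⟨-, hmin⟩ := PySem.Chars.find_spec h0
  by_contra hne
  have : 0 < (PySem.Chars.find t p).toNat := by omega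
  exact hmin 0 this (by simpa using h)

theorem find_eq_of (p t : List Char) (n : Nat) (h1 : p <+: t.drop n)
    (h2 : ∀ k < n, ¬ p <+: t.drop k) : PySem.Chars.find t p = (n : Int) := by
  have h0 : 0 ≤ PySem.Chars.find t p := by
    rw [PySem.Chars.find_nonneg_iff]
    exact (h1.isInfix).trans (List.drop_suffix n t).isInfix
  obtain ⟨hpre, hmin⟩ := PySem.Chars.find_spec h0
  have : (PySem.Chars.find t p).toNat = n := by
    rcases Nat.lt_trichotomy (PySem.Chars.find t p).toNat n with hlt | heq | hgt
    · exact absurd hpre (h2 _ hlt)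
    · exact heq
    · exact absurd h1 (hmin n hgt)
  omega

theorem find_cons (p t : List Char) (c : Char) (_hp : p ≠ []) (h : ¬ p <+: (c :: t)) :
    PySem.Chars.find (c :: t) p
      = (if PySem.Chars.find t p = -1 then -1 else PySem.Chars.find t p + 1) := by
  by_cases hf : PySem.Chars.find t p = -1
  · rw [if_pos hf, PySem.Chars.find_eq_neg_one_iff] at *
    rw [List.infix_cons_iff]
    push Not
    exact ⟨h, hf⟩
  · rw [if_neg hf]
    have h0 : 0 ≤ PySem.Chars.find t p := by
      have := PySem.Chars.neg_one_le_find t p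
      omega
    obtain ⟨hpre, hmin⟩ := PySem.Chars.find_spec h0
    set j := (PySem.Chars.find t p).toNat with hj
    have : PySem.Chars.find (c :: t) p = ((j + 1 : Nat) : Int) := by
      apply find_eq_of
      · simpa using hpre
      · intro k hk
        match k with
        | 0 => simpa using h
        | m + 1 =>
          simp only [List.drop_succ_cons]
          exact hmin m (by omega)
    omega
def mySplitF (p : List Char) : Nat → List Char → List (List Char)
  | 0, t => [t]
  | fuel + 1, t =>
    if PySem.Chars.find t p = -1 then [t]
    else t.take (PySem.Chars.find t p).toNat
          :: mySplitF p fuel (t.drop ((PySem.Chars.find t p).toNat + p.length))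

def mySplit (p t : List Char) : List (List Char) := mySplitF p t.length t

theorem mySplitF_irrel (p : List Char) (hp : p ≠ []) :
    ∀ (f1 : Nat) (t : List Char) (f2 : Nat), t.length ≤ f1 → t.length ≤ f2 →
      mySplitF p f1 t = mySplitF p f2 t := by
  intro f1
  induction f1 with
  | zero =>
    intro t f2 h1 h2
    have ht : t = [] := by
      cases t with
      | nil => rfl
      | cons a b => simp at h1
    subst ht
    cases f2 with
    | zero => rfl
    | succ k => simp [mySplitF, find_nil_of_ne p hp]
  | succ f ih =>
    intro t f2 h1 h2
    cases t with
    | nil =>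
      cases f2 with
      | zero => simp [mySplitF, find_nil_of_ne p hp]
      | succ k => simp [mySplitF, find_nil_of_ne p hp]
    | cons a b =>
      cases f2 with
      | zero => simp at h2
      | succ k =>
        show mySplitF p (f+1) (a::b) = mySplitF p (k+1) (a::b)
        rw [mySplitF, mySplitF]
        by_cases hf : PySem.Chars.find (a::b) p = -1
        · simp [hf]
        · rw [if_neg hf, if_neg hf]
          have hlt := drop_lt_of_find p (a::b) hp hf
          simp only [List.length_cons] at h1 h2 hlt
          rw [ih _ k (by omega) (by omega)]

theorem mySplit_unfold (p t : List Char) (hp : p ≠ []) :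
    mySplit p t = if PySem.Chars.find t p = -1 then [t]
      else t.take (PySem.Chars.find t p).toNat
            :: mySplit p (t.drop ((PySem.Chars.find t p).toNat + p.length)) := by
  unfold mySplit
  rw [mySplitF_irrel p hp t.length t (t.length + 1) (by omega) (by omega)]
  rw [mySplitF]
  by_cases hf : PySem.Chars.find t p = -1
  · simp [hf]
  · have hlt := drop_lt_of_find p t hp hf
    rw [if_neg hf, if_neg hf]
    rw [mySplitF_irrel p hp t.length _ (t.drop ((PySem.Chars.find t p).toNat + p.length)).length (by omega) (by omega)]

theorem mySplit_ne_nil (p t : List Char) (hp : p ≠ []) : mySplit p t ≠ [] := by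
  rw [mySplit_unfold p t hp]
  split <;> simp

theorem mySplit_cons_not_prefix (p t : List Char) (c : Char) (hp : p ≠ []) (h : ¬ p <+: (c :: t)) :
    mySplit p (c :: t) = (c :: (mySplit p t).headI) :: (mySplit p t).tail := by
  rw [mySplit_unfold p (c::t) hp, find_cons p t c hp h, mySplit_unfold p t hp]
  by_cases hf : PySem.Chars.find t p = -1
  · simp [hf]
  · have h0 : 0 ≤ PySem.Chars.find t p := by
      have := PySem.Chars.neg_one_le_find t p
      omega
    have hne : PySem.Chars.find t p + 1 ≠ -1 := by omega
    simp only [if_neg hf, if_neg hne]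
    have htn : (PySem.Chars.find t p + 1).toNat = (PySem.Chars.find t p).toNat + 1 := by omega
    rw [htn]
    have hsh : (PySem.Chars.find t p).toNat + 1 + p.length
        = ((PySem.Chars.find t p).toNat + p.length) + 1 := by omega
    rw [hsh]
    simp only [List.take_succ_cons, List.drop_succ_cons, List.headI, List.tail]

theorem splitOn_go_eq (p : List Char) (hp : p ≠ []) :
    ∀ (fuel : Nat) (l cur : List Char) (acc : List (List Char)), l.length < fuel →
      PySem.Chars.splitOn.go p fuel l cur acc
        = acc.reverse ++ (cur.reverse ++ (mySplit p l).headI) :: (mySplit p l).tail := by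
  intro fuel
  induction fuel with
  | zero => intro l cur acc h; omega
  | succ f ih =>
    intro l cur acc h
    cases l with
    | nil =>
      show ((cur.reverse) :: acc).reverse = _
      rw [show mySplit p [] = [[]] by
        rw [mySplit_unfold p [] hp]; simp [find_nil_of_ne p hp]]
      simp [List.headI, List.tail]
    | cons c rest =>
      show (if p.isPrefixOf (c::rest) = true then
              PySem.Chars.splitOn.go p f (List.drop p.length (c::rest)) [] (cur.reverse :: acc)
            else PySem.Chars.splitOn.go p f rest (c :: cur) acc) = _
      by_cases hpre : p <+: (c :: rest)
      · rw [if_pos (List.isPrefixOf_iff_prefix.mpr hpre)]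
        have hfz := find_eq_zero p (c::rest) hpre
        have hM := mySplit_unfold p (c::rest) hp
        rw [hfz] at hM
        have hne : (0 : Int) ≠ -1 := by omega
        simp only [if_neg hne, Int.toNat_zero, List.take_zero, Nat.zero_add] at hM
        have hlen : (List.drop p.length (c::rest)).length < f := by
          have hplen : 0 < p.length := List.length_pos_iff.mpr hp
          simp only [List.length_drop, List.length_cons] at *
          omega
        rw [ih _ [] (cur.reverse :: acc) hlen, hM]
        cases hMd : mySplit p (List.drop p.length (c::rest)) with
        | nil => exact absurd hMd (mySplit_ne_nil p _ hp)
        | cons x xs => simp [List.headI, List.tail]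
      · rw [if_neg (by simpa using fun hh => hpre (List.isPrefixOf_iff_prefix.mp hh))]
        have hlen : rest.length < f := by simp at h; omega
        rw [ih rest (c :: cur) acc hlen, mySplit_cons_not_prefix p rest c hp hpre]
        simp [List.headI, List.tail]

theorem splitOn_eq_mySplit (p t : List Char) (hp : p ≠ []) :
    PySem.Chars.splitOn t p = mySplit p t := by
  show PySem.Chars.splitOn.go p (t.length + 1) t [] [] = _
  rw [splitOn_go_eq p hp (t.length + 1) t [] [] (by omega)]
  cases hMd : mySplit p t with
  | nil => exact absurd hMd (mySplit_ne_nil p t hp)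
  | cons x xs => simp [List.headI, List.tail]

theorem join_mySplit (p t : List Char) (hp : p ≠ []) :
    PySem.Chars.join p (mySplit p t) = t := by
  by_cases hf : PySem.Chars.find t p = -1
  · rw [mySplit_unfold p t hp, if_pos hf, PySem.Chars.join_singleton]
  · have hlt := drop_lt_of_find p t hp hf
    rw [mySplit_unfold p t hp, if_neg hf]
    have h0 : 0 ≤ PySem.Chars.find t p := by
      have := PySem.Chars.neg_one_le_find t p
      omega
    obtain ⟨hpre, -⟩ := PySem.Chars.find_spec h0
    set i := (PySem.Chars.find t p).toNat
    have hrec := join_mySplit p (t.drop (i + p.length)) hp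
    cases hMd : mySplit p (t.drop (i + p.length)) with
    | nil => exact absurd hMd (mySplit_ne_nil p _ hp)
    | cons x xs =>
      rw [hMd] at hrec
      rw [PySem.Chars.join_cons_cons, hrec]
      conv_rhs => rw [← List.take_append_drop i t]
      rw [prefix_drop_eq p t i hpre]
      simp
termination_by t.length
decreasing_by exact hlt
theorem mySplit_sp_nil : mySplit [' '] [] = [[]] := by
  rw [mySplit_unfold [' '] [] (by simp), if_pos (find_nil_of_ne [' '] (by simp))]

theorem mySplit_sp_cons_sp (t : List Char) : mySplit [' '] (' ' :: t) = [] :: mySplit [' '] t := by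
  have hpre : [' '] <+: (' ' :: t) := by simp
  rw [mySplit_unfold [' '] (' '::t) (by simp), find_eq_zero [' '] (' '::t) hpre]
  norm_num

theorem mySplit_sp_cons (t : List Char) (c : Char) (hc : c ≠ ' ') :
    mySplit [' '] (c :: t) = (c :: (mySplit [' '] t).headI) :: (mySplit [' '] t).tail := by
  apply mySplit_cons_not_prefix [' '] t c (by simp)
  intro hpre
  rw [List.cons_prefix_cons] at hpre
  exact hc hpre.1.symm

theorem join_cons_head (sep : List Char) (c : Char) (h : List Char) (L : List (List Char)) :
    PySem.Chars.join sep ((c :: h) :: L) = c :: PySem.Chars.join sep (h :: L) := by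
  cases L with
  | nil => rw [PySem.Chars.join_singleton, PySem.Chars.join_singleton]
  | cons x xs => rw [PySem.Chars.join_cons_cons, PySem.Chars.join_cons_cons]; simp

theorem join_snoc_nil (sep : List Char) (L : List (List Char)) (hL : L ≠ []) :
    PySem.Chars.join sep (L ++ [[]]) = PySem.Chars.join sep L ++ sep := by
  induction L with
  | nil => exact absurd rfl hL
  | cons x xs ih =>
    cases xs with
    | nil =>
      rw [List.singleton_append, PySem.Chars.join_cons_cons, PySem.Chars.join_singleton,
        PySem.Chars.join_singleton]
      simp
    | cons y ys =>
      have ih' := ih (by simp)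
      simp only [List.cons_append] at ih' ⊢
      rw [PySem.Chars.join_cons_cons, ih', PySem.Chars.join_cons_cons]
      simp

theorem join_snoc_snoc (sep : List Char) (L : List (List Char)) (z : List Char) (c : Char) :
    PySem.Chars.join sep (L ++ [z ++ [c]]) = PySem.Chars.join sep (L ++ [z]) ++ [c] := by
  induction L with
  | nil => rw [List.nil_append, List.nil_append, PySem.Chars.join_singleton, PySem.Chars.join_singleton]
  | cons x xs ih =>
    cases xs with
    | nil =>
      rw [List.singleton_append, PySem.Chars.join_cons_cons, PySem.Chars.join_singleton,
        List.singleton_append, PySem.Chars.join_cons_cons, PySem.Chars.join_singleton]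
      simp
    | cons y ys =>
      simp only [List.cons_append] at ih ⊢
      rw [PySem.Chars.join_cons_cons, ih, PySem.Chars.join_cons_cons]
      simp

theorem head_ctx (s : List Char) : ∀ k : Nat, 1 ≤ k →
    PySem.Chars.join [' '] ((mySplit [' '] s).take k) = pvScan s k := by
  induction s with
  | nil =>
    intro k hk
    rw [mySplit_sp_nil]
    cases k with
    | zero => omega
    | succ n => simp [pvScan, PySem.Chars.join_singleton]
  | cons c t ih =>
    intro k hk
    by_cases hc : c = ' '
    · subst hc
      rw [mySplit_sp_cons_sp]
      by_cases hk1 : k = 1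
      · subst hk1
        simp [pvScan, PySem.Chars.join_singleton]
      · have hk2 : 2 ≤ k := by omega
        obtain ⟨m, rfl⟩ : ∃ m, k = m + 1 := ⟨k - 1, by omega⟩
        rw [List.take_succ_cons]
        cases hMd : mySplit [' '] t with
        | nil => exact absurd hMd (mySplit_ne_nil [' '] t (by simp))
        | cons x xs =>
          have hm1 : 1 ≤ m := by omega
          obtain ⟨m', rfl⟩ : ∃ m', m = m' + 1 := ⟨m - 1, by omega⟩
          rw [List.take_succ_cons, PySem.Chars.join_cons_cons]
          have := ih (m' + 1) (by omega)
          rw [hMd, List.take_succ_cons] at this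
          rw [this]
          show _ = pvScan (' ' :: t) (m' + 1 + 1)
          rw [pvScan]
          simp
    · rw [mySplit_sp_cons t c hc]
      cases hMd : mySplit [' '] t with
      | nil => exact absurd hMd (mySplit_ne_nil [' '] t (by simp))
      | cons x xs =>
        simp only [List.headI, List.tail]
        obtain ⟨m, rfl⟩ : ∃ m, k = m + 1 := ⟨k - 1, by omega⟩
        rw [List.take_succ_cons, join_cons_head]
        have := ih (m + 1) (by omega)
        rw [hMd, List.take_succ_cons] at this
        rw [this]
        show _ = pvScan (c :: t) (m + 1)
        rw [pvScan]
        simp [hc]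
theorem mySplit_sp_snoc_sp (s : List Char) :
    mySplit [' '] (s ++ [' ']) = mySplit [' '] s ++ [[]] := by
  induction s with
  | nil =>
    rw [List.nil_append, mySplit_sp_cons_sp, mySplit_sp_nil]
    rfl
  | cons a t ih =>
    by_cases ha : a = ' '
    · subst ha
      rw [List.cons_append, mySplit_sp_cons_sp, ih, mySplit_sp_cons_sp]
      rfl
    · rw [List.cons_append, mySplit_sp_cons t a ha, mySplit_sp_cons (t ++ [' ']) a ha, ih]
      cases hMd : mySplit [' '] t with
      | nil => exact absurd hMd (mySplit_ne_nil [' '] t (by simp))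
      | cons x xs => simp [List.headI, List.tail]

theorem mySplit_sp_snoc (s : List Char) (c : Char) (hc : c ≠ ' ') :
    mySplit [' '] (s ++ [c])
      = (mySplit [' '] s).dropLast ++ [(mySplit [' '] s).getLastD [] ++ [c]] := by
  induction s with
  | nil =>
    rw [List.nil_append, mySplit_sp_cons [] c hc, mySplit_sp_nil]
    simp [List.headI, List.tail]
  | cons a t ih =>
    by_cases ha : a = ' '
    · subst ha
      rw [List.cons_append, mySplit_sp_cons_sp, ih, mySplit_sp_cons_sp]
      cases hMd : mySplit [' '] t with
      | nil => exact absurd hMd (mySplit_ne_nil [' '] t (by simp))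
      | cons x xs => simp
    · rw [List.cons_append, mySplit_sp_cons (t ++ [c]) a ha, ih, mySplit_sp_cons t a ha]
      cases hMd : mySplit [' '] t with
      | nil => exact absurd hMd (mySplit_ne_nil [' '] t (by simp))
      | cons x xs =>
        cases xs with
        | nil => simp [List.headI, List.tail]
        | cons y ys => simp [List.headI, List.tail]

theorem tail_ctx (s : List Char) : ∀ k : Nat, 1 ≤ k →
    PySem.Chars.join [' ']
        ((mySplit [' '] s).drop ((mySplit [' '] s).length - k))
      = (pvScan s.reverse k).reverse := by
  induction s using List.reverseRecOn with
  | nil =>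
    intro k hk
    rw [mySplit_sp_nil]
    simp [pvScan, PySem.Chars.join_singleton, show (1:Nat) - k = 0 by omega]
  | append_singleton s c ih =>
    intro k hk
    rw [List.reverse_append, List.reverse_singleton, List.singleton_append]
    cases hMd : mySplit [' '] s with
    | nil => exact absurd hMd (mySplit_ne_nil [' '] s (by simp))
    | cons x xs =>
    by_cases hc : c = ' '
    · subst hc
      rw [mySplit_sp_snoc_sp, hMd]
      by_cases hk1 : k = 1
      · subst hk1
        have h9 : ((x :: xs) ++ [[]]).length - 1 = (x :: xs).length := by simp
        rw [h9, List.drop_append_of_le_length (by simp)]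
        simp [pvScan, PySem.Chars.join_singleton]
      · have hk2 : 2 ≤ k := by omega
        have hlen : ((x :: xs) ++ [[]]).length - k = (x :: xs).length - (k - 1) := by
          simp; omega
        rw [hlen, List.drop_append_of_le_length (by simp)]
        have ihk := ih (k - 1) (by omega)
        rw [hMd] at ihk
        rw [join_snoc_nil [' '] _ (by
          have : (x :: xs).length - (k - 1) < (x :: xs).length := by simp; omega
          simp [List.drop_eq_nil_iff]
          omega), ihk]
        rw [show pvScan (' ' :: s.reverse) k = ' ' :: pvScan s.reverse (k - 1) by
          rw [pvScan]; simp [show ¬ (k - 1 = 0) by omega]]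
        simp
    · rw [mySplit_sp_snoc s c hc, hMd]
      have hlen : ((x :: xs).dropLast ++ [(x :: xs).getLastD [] ++ [c]]).length - k
          = (x :: xs).length - k := by simp
      have hle : (x :: xs).length - k ≤ (x :: xs).dropLast.length := by
        simp; omega
      rw [hlen, List.drop_append_of_le_length hle]
      have hgl : (x :: xs).getLast (by simp) = (x :: xs).getLastD [] := by
        rw [List.getLastD_eq_getLast?, List.getLast?_eq_some_getLast (by simp)]
        rfl
      have hsplit : (x :: xs).drop ((x :: xs).length - k)
          = (x :: xs).dropLast.drop ((x :: xs).length - k) ++ [(x :: xs).getLastD []] := by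
        calc (x :: xs).drop ((x :: xs).length - k)
            = ((x :: xs).dropLast ++ [(x :: xs).getLast (by simp)]).drop ((x :: xs).length - k) := by
              rw [List.dropLast_append_getLast]
          _ = (x :: xs).dropLast.drop ((x :: xs).length - k) ++ [(x :: xs).getLast (by simp)] :=
              List.drop_append_of_le_length hle
          _ = (x :: xs).dropLast.drop ((x :: xs).length - k) ++ [(x :: xs).getLastD []] := by
              rw [hgl]
      have ihk := ih k hk
      rw [hMd, hsplit] at ihk
      rw [join_snoc_snoc, ihk]
      rw [show pvScan (c :: s.reverse) k = c :: pvScan s.reverse k by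
        rw [pvScan]; simp [hc]]
      simp

theorem slice_last10 (L : List (List Char)) :
    PySem.List.slice L (some (-10)) none = L.drop (L.length - 10) := by
  show List.take _ (List.drop _ L) = _
  unfold PySem.List.clampIdx
  by_cases h : (L.length : Int) + (-10) < 0
  · have h10 : L.length - 10 = 0 := by omega
    simp only [if_pos (by omega : (-10 : Int) < 0), if_pos h, h10]
    simp
  · simp only [if_pos (by omega : (-10 : Int) < 0), if_neg h]
    have : ((L.length : Int) + (-10)).toNat = L.length - 10 := by omega
    rw [this]
    apply List.take_of_length_le
    simp

theorem pvCtxA_eq (parted : List Char × List Char × List Char) :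
    pvCtxA parted = pvClean
      (PySem.Chars.join [' '] (PySem.List.slice (PySem.Chars.splitOn parted.1 [' ']) (some (-10)) none)
        ++ parted.2.1
        ++ PySem.Chars.join [' '] (PySem.List.slice (PySem.Chars.splitOn parted.2.2 [' ']) none (some 10))) := rfl

-- entries B emits, and the list of them A's order produces, expressed over the parts list
def pvEntry (base p x suf : List Char) : String × String :=
  (String.ofList base, String.ofList (pvClean ((pvScan x.reverse 10).reverse ++ p ++ pvScan suf 10)))

def ctxB (base p : List Char) : List (List Char) → List (String × String)
  | [] => []
  | [_] => []
  | x :: y :: rest => pvEntry base p x (PySem.Chars.join p (y :: rest)) :: ctxB base p (y :: rest)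

theorem ctx_words (x : List Char) :
    PySem.Chars.join [' '] (PySem.List.slice (PySem.Chars.splitOn x [' ']) (some (-10)) none)
      = (pvScan x.reverse 10).reverse ∧
    PySem.Chars.join [' '] (PySem.List.slice (PySem.Chars.splitOn x [' ']) none (some 10))
      = pvScan x 10 := by
  rw [splitOn_eq_mySplit [' '] x (by simp), slice_last10,
    PySem.List.slice_to _ (by omega : (0:Int) ≤ 10)]
  exact ⟨tail_ctx x 10 (by omega), head_ctx x 10 (by omega)⟩

-- A's while loop produces exactly ctxB over the parts of the text
theorem loopA_eq_ctxB (p name : List Char) (hp : p ≠ []) :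
    ∀ (fuel : Nat) (t : List Char), t.length < fuel → ∀ acc,
      pvLoopA p name fuel (pvPartition t p) acc
        = acc ++ ctxB (PySem.List.pyGetD (PySem.Chars.splitOn name ['/']) (-1) []) p (mySplit p t) := by
  intro fuel
  induction fuel with
  | zero => intro t h; omega
  | succ f ih =>
    intro t h acc
    by_cases hf : PySem.Chars.find t p = -1
    · have hpart : pvPartition t p = (t, [], []) := by
        unfold pvPartition
        rw [if_pos hf]
      rw [pvLoopA]
      simp only [hpart]
      rw [if_neg (by simpa using fun hh => hp (List.eq_nil_of_length_eq_zero hh.symm))]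
      rw [mySplit_unfold p t hp, if_pos hf]
      simp [ctxB]
    · have hlt := drop_lt_of_find p t hp hf
      set i := (PySem.Chars.find t p).toNat with hi
      have hpart : pvPartition t p = (t.take i, p, t.drop (i + p.length)) := by
        unfold pvPartition
        rw [if_neg hf]
      rw [pvLoopA]
      simp only [hpart]
      simp only [if_true]
      rw [ih (t.drop (i + p.length)) (by omega)]
      rw [mySplit_unfold p t hp, if_neg hf, ← hi]
      cases hMd : mySplit p (t.drop (i + p.length)) with
      | nil => exact absurd hMd (mySplit_ne_nil p _ hp)
      | cons y rest =>
        rw [ctxB]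
        have hjoin : PySem.Chars.join p (y :: rest) = t.drop (i + p.length) := by
          rw [← hMd]
          exact join_mySplit p _ hp
        rw [hjoin]
        have hentry : (String.ofList (PySem.List.pyGetD (PySem.Chars.splitOn name ['/']) (-1) []),
              String.ofList (pvCtxA (t.take i, p, t.drop (i + p.length))))
            = pvEntry (PySem.List.pyGetD (PySem.Chars.splitOn name ['/']) (-1) []) p (t.take i)
                (t.drop (i + p.length)) := by
          rw [pvCtxA_eq]
          unfold pvEntry
          rw [(ctx_words (t.take i)).1, (ctx_words (t.drop (i + p.length))).2]
        rw [hentry]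
        simp

-- B's feed: it computes pvScan, distributes over ++, and pvWhileB sums it over joined parts
theorem scan_eq_feed (s : List Char) : ∀ k, pvScan s k = (pvFeed s k).1 := by
  induction s with
  | nil => intro k; rfl
  | cons c t ih =>
    intro k
    rw [pvScan, pvFeed]
    by_cases hc : c = ' '
    · by_cases hk : k - 1 = 0 <;> simp [hc, hk, ih]
    · simp [hc, ih]

theorem feed_append (v : List Char) : ∀ (u : List Char) (k : Nat), 1 ≤ k →
    pvFeed (u ++ v) k = (if (pvFeed u k).2 = 0 then pvFeed u k
      else ((pvFeed u k).1 ++ (pvFeed v (pvFeed u k).2).1, (pvFeed v (pvFeed u k).2).2)) := by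
  intro u
  induction u with
  | nil => intro k hk; simp [pvFeed, show k ≠ 0 by omega]
  | cons c t ih =>
    intro k hk
    rw [List.cons_append, pvFeed, pvFeed]
    by_cases hc : c = ' '
    · by_cases hk1 : k - 1 = 0
      · simp [hc, hk1]
      · simp only [hc, if_neg hk1]
        rw [ih (k - 1) (by omega)]
        by_cases h2 : (pvFeed t (k - 1)).2 = 0 <;> simp [h2]
    · simp only [hc]
      rw [ih k hk]
      by_cases h2 : (pvFeed t k).2 = 0 <;> simp [h2]

theorem scan_join (p : List Char) :
    ∀ (rest : List (List Char)) (y : List Char) (k : Nat), 1 ≤ k →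
      pvScan (PySem.Chars.join p (y :: rest)) k
        = (pvFeed y k).1 ++ pvWhileB p rest (pvFeed y k).2 := by
  intro rest
  induction rest with
  | nil =>
    intro y k hk
    rw [PySem.Chars.join_singleton, scan_eq_feed, pvWhileB]
    simp
  | cons z r ih =>
    intro y k hk
    rw [PySem.Chars.join_cons_cons, scan_eq_feed]
    have hassoc : y ++ p ++ PySem.Chars.join p (z :: r) = y ++ (p ++ PySem.Chars.join p (z :: r)) := by
      simp
    rw [hassoc, feed_append _ y k hk]
    by_cases h1 : (pvFeed y k).2 = 0
    · rw [if_pos h1, pvWhileB, if_pos h1]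
      simp
    · rw [if_neg h1]
      rw [feed_append _ p ((pvFeed y k).2) (by omega)]
      rw [pvWhileB, if_neg h1]
      by_cases h2 : (pvFeed p (pvFeed y k).2).2 = 0
      · rw [if_pos h2, if_pos h2]
      · rw [if_neg h2, if_neg h2]
        have hz := ih z (pvFeed p (pvFeed y k).2).2 (by omega)
        rw [scan_eq_feed] at hz
        simp [hz]

theorem loopB_eq_ctxB (base p : List Char) :
    ∀ (parts : List (List Char)), pvLoopB base p parts = ctxB base p parts := by
  intro parts
  match parts with
  | [] => rfl
  | [x] => rfl
  | x :: y :: rest =>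
    rw [pvLoopB, ctxB, loopB_eq_ctxB base p (y :: rest)]
    unfold pvEntry
    rw [← scan_eq_feed, scan_join p rest y 10 (by omega), scan_eq_feed]

-- ===== VERDICT (by name: the statement is the Claim_ definition above) =====
theorem find_phrases_spec : Claim_equal_find_phrases := by
  intro phrases files _ hpre
  show find_phrases phrases files = find_phrases_alt phrases files
  unfold find_phrases find_phrases_alt
  congr 1
  apply PySem.List.foldl_congr_mem
  intro found p hp
  have hne : p.toList ≠ [] := by simp [hpre p hp]
  congr 1
  apply PySem.List.foldl_congr_mem
  intro hits nt _
  rw [loopA_eq_ctxB p.toList nt.1.toList hne (nt.2.toList.length + 1) nt.2.toList (by omega)]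
  rw [splitOn_eq_mySplit p.toList nt.2.toList hne, loopB_eq_ctxB]
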